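-- pv_equiv track=rewrite | github.com/oliver94s/Advent_of_Code_2020 | day11/seating_system.py | down_left
-- ===== SOURCE A (Python) =====
-- FLOOR = "."
--
-- OUT_OF_BOUNDS = "out of bounds"
--
-- def get_seat(seats, row, col):
--     if row >= 0 and row < len(seats):
--         if col >= 0 and col < len(seats[0]):
--             return seats[row][col]
--     return OUT_OF_BOUNDS
--
-- def down_left(seats, row, col):
--     row += 1
--     col -= 1
--     seat = get_seat(seats, row, col)
--
--     if seat != FLOOR:
--         return seat
--     else:
--         return down_left(seats, row, col)
-- ===== SOURCE B (Python) =====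
-- FLOOR = "."
--
-- OUT_OF_BOUNDS = "out of bounds"
--
--
-- def down_left(seats, row, col):
--     height = len(seats)
--     width = len(seats[0]) if seats else 0
--     r, c = row + 1, col - 1
--     while 0 <= r < height and 0 <= c < width:
--         seat = seats[r][c]
--         if seat != FLOOR:
--             return seat
--         r += 1
--         c -= 1
--     return OUT_OF_BOUNDS
-- ===== Notes on version B (the rewrite author's own statement) =====
-- stated objective: idiomatic
-- what changed: Replaces the tail recursion through a shared get_seat helper by a single while loop with the bounds check inlined into the loop condition and the out-of-bounds sentinel returned once after the loop.
-- outside the precondition, e.g. on down_left([['a', 'b'], []], -1, 2): A returns 'b', B returns 'b'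
import Mathlib
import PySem

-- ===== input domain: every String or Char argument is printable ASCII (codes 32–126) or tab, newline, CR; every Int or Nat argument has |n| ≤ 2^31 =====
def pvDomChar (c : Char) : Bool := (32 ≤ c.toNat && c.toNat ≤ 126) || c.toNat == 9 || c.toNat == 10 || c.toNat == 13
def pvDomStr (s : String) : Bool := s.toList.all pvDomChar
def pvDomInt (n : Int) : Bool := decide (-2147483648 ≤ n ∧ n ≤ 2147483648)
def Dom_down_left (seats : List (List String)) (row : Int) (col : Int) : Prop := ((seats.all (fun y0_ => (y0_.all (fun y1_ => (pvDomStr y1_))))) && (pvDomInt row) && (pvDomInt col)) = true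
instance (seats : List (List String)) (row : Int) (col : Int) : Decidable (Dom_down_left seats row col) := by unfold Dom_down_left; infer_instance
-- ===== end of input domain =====

-- ===== PORT A =====
-- B replaces the tail recursion through get_seat by a single bounded while loop (idiomatic decomposition; same cost).
def FLOOR : String := "."
def OUT_OF_BOUNDS : String := "out of bounds"

-- seats[row][col] under the guards 0 ≤ row < len(seats), 0 ≤ col < len(seats[0]); Pre_ guarantees the
-- inner index is in range (Python raises IndexError on ragged rows there), so the getD defaults never fire inside Pre_.
def get_seat (seats : List (List String)) (row : Int) (col : Int) : String :=
  if 0 ≤ row ∧ row < (seats.length : Int) then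
    if 0 ≤ col ∧ col < ((((PySem.List.pyGet? seats 0).getD []).length : Int)) then
      (PySem.List.pyGet? ((PySem.List.pyGet? seats row).getD []) col).getD ""
    else OUT_OF_BOUNDS
  else OUT_OF_BOUNDS

-- needed by down_left's termination proof (cited in decreasing_by)
theorem get_seat_floor_bound (seats : List (List String)) (r c : Int)
    (h : ¬ get_seat seats r c ≠ FLOOR) : 0 ≤ r ∧ r < (seats.length : Int) := by
  unfold get_seat at h
  split_ifs at h with h1 h2
  · exact h1
  · simp [OUT_OF_BOUNDS, FLOOR] at h
  · simp [OUT_OF_BOUNDS, FLOOR] at h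

def down_left (seats : List (List String)) (row : Int) (col : Int) : String :=
  let row' := row + 1
  let col' := col - 1
  let seat := get_seat seats row' col'
  if seat ≠ FLOOR then seat
  else down_left seats row' col'
termination_by ((seats.length : Int) - row).toNat
decreasing_by
  have := get_seat_floor_bound seats (row + 1) (col - 1) (by assumption)
  omega

-- ===== PORT B =====
-- the while loop of Source B: condition 0 <= r < height and 0 <= c < width, body reads seats[r][c]
def downLeftLoop (seats : List (List String)) (height : Int) (width : Int) (r : Int) (c : Int) : String :=
  if h : 0 ≤ r ∧ r < height ∧ 0 ≤ c ∧ c < width then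
    -- seats[r][c]; Python raises IndexError when the row is ragged (outside Pre_), the "?" fallback is arbitrary there
    let seat := (PySem.List.pyGet? ((PySem.List.pyGet? seats r).getD []) c).getD "?"
    if seat ≠ FLOOR then seat
    else downLeftLoop seats height width (r + 1) (c - 1)
  else OUT_OF_BOUNDS
termination_by (height - r).toNat
decreasing_by omega

def down_left_alt (seats : List (List String)) (row : Int) (col : Int) : String :=
  let height := (seats.length : Int)
  let width : Int := if seats.isEmpty then 0 else ((seats.headD []).length : Int)
  downLeftLoop seats height width (row + 1) (col - 1)

-- ===== PRECONDITION & SPEC =====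
-- Pre_ excludes inputs on which the diagonal scan can reach a cell missing from a ragged row
-- (col within len(seats[0]) but beyond that row's own length), where Python A (and B) raise IndexError.
-- It is slightly wider than the exact crash set (A may stop earlier at a non-floor seat), hence the cite.
def Pre_down_left (seats : List (List String)) (row : Int) (col : Int) : Prop :=
  ∀ i : Nat, i < seats.length → row < (i : Int) → 0 ≤ col - ((i : Int) - row) →
    col - ((i : Int) - row) < ((seats.headD []).length : Int) →
    col - ((i : Int) - row) < ((seats.getD i []).length : Int)
instance (seats : List (List String)) (row : Int) (col : Int) : Decidable (Pre_down_left seats row col) := by unfold Pre_down_left; infer_instance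
def pvWitness_down_left : List (List String) × Int × Int := ([["L"]], -1, 1)
def Spec_down_left (seats : List (List String)) (row : Int) (col : Int) (out : String) : Prop := out = down_left_alt seats row col
instance (seats : List (List String)) (row : Int) (col : Int) (out : String) : Decidable (Spec_down_left seats row col out) := by unfold Spec_down_left; infer_instance

-- ===== CLAIM (what is proved, stated in full; the proofs are below) =====
def Claim_equal_down_left : Prop := ∀ (seats : List (List String)) (row : Int) (col : Int), Dom_down_left seats row col → Pre_down_left seats row col → Spec_down_left seats row col (down_left seats row col)

-- ===== LEMMAS AND PROOFS =====

theorem width_eq (seats : List (List String)) (h : seats ≠ []) :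
    (PySem.List.pyGet? seats 0).getD [] = seats.headD [] := by
  cases seats with
  | nil => exact absurd rfl h
  | cons x xs => simp

theorem pre_step (seats : List (List String)) (row col : Int)
    (hp : Pre_down_left seats row col) : Pre_down_left seats (row + 1) (col - 1) := by
  intro i hi hlt h0 hw
  have e : col - 1 - ((i : Int) - (row + 1)) = col - ((i : Int) - row) := by ring
  rw [e] at h0 hw ⊢
  exact hp i hi (by omega) h0 hw

theorem main_eq (seats : List (List String)) :
    ∀ (n : Nat) (row col : Int), Pre_down_left seats row col → ((seats.length : Int) - row).toNat ≤ n →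
      down_left seats row col =
        downLeftLoop seats (seats.length : Int)
          (if seats.isEmpty then 0 else ((seats.headD []).length : Int)) (row + 1) (col - 1) := by
  intro n
  induction n with
  | zero =>
    intro row col _ hn
    rw [down_left, downLeftLoop]
    have hlen : (seats.length : Int) ≤ row := by omega
    have hg : ¬ (0 ≤ row + 1 ∧ row + 1 < (seats.length : Int)) := by omega
    rw [get_seat, if_neg hg]
    have : ¬ (0 ≤ row + 1 ∧ row + 1 < (seats.length : Int) ∧ 0 ≤ col - 1 ∧
        col - 1 < (if seats.isEmpty then 0 else ((seats.headD []).length : Int))) := by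
      intro hc; exact hg ⟨hc.1, hc.2.1⟩
    rw [dif_neg this]
    simp [OUT_OF_BOUNDS, FLOOR]
  | succ n ih =>
    intro row col hp hn
    rw [down_left, downLeftLoop]
    by_cases hg : 0 ≤ row + 1 ∧ row + 1 < (seats.length : Int) ∧ 0 ≤ col - 1 ∧
        col - 1 < (if seats.isEmpty then 0 else ((seats.headD []).length : Int))
    · have hne : seats ≠ [] := by
        intro he; subst he; simp at hg; omega
      have hw : (if seats.isEmpty then (0:Int) else ((seats.headD []).length : Int))
          = (((PySem.List.pyGet? seats 0).getD []).length : Int) := by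
        rw [width_eq seats hne]; simp [List.isEmpty_iff, hne]
      rw [get_seat,
        if_pos (show 0 ≤ row + 1 ∧ row + 1 < (seats.length : Int) from ⟨hg.1, hg.2.1⟩)]
      rw [if_pos (show 0 ≤ col - 1 ∧
            col - 1 < (((PySem.List.pyGet? seats 0).getD []).length : Int) from
          ⟨hg.2.2.1, hw ▸ hg.2.2.2⟩)]
      rw [dif_pos hg]
      -- Pre_ puts the accessed cell in range: both fallbacks are dead, the two cell reads coincide
      have hi : (row + 1).toNat < seats.length := by omega
      have hrow : row < ((row + 1).toNat : Int) := by omega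
      have hcell : ((PySem.List.pyGet? seats (row + 1)).getD []) = seats.getD (row + 1).toNat [] := by
        rw [PySem.List.pyGet?_eq_some_getElem seats hg.1 hg.2.1]
        simp [List.getD_eq_getElem?_getD, List.getElem?_eq_getElem hi]
      have hc : col - 1 < ((seats.getD (row + 1).toNat []).length : Int) := by
        have := hp (row + 1).toNat hi hrow (by omega)
          (by rw [← width_eq seats hne]; omega)
        push_cast at this ⊢; omega
      have hcv : PySem.List.pyGet? ((PySem.List.pyGet? seats (row + 1)).getD []) (col - 1)
          = some ((seats.getD (row + 1).toNat [])[(col - 1).toNat]'(by omega)) := by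
        rw [hcell]
        exact PySem.List.pyGet?_eq_some_getElem _ hg.2.2.1 hc
      rw [hcv]
      by_cases hs : (seats.getD (row + 1).toNat [])[(col - 1).toNat]'(by omega) ≠ FLOOR
      · simp only [Option.getD_some, if_pos hs]
      · simp only [Option.getD_some, if_neg hs]
        exact ih (row + 1) (col - 1) (pre_step seats row col hp) (by omega)
    · rw [dif_neg hg]
      rw [get_seat]
      by_cases h1 : 0 ≤ row + 1 ∧ row + 1 < (seats.length : Int)
      · rw [if_pos h1]
        have hne : seats ≠ [] := by
          intro he; subst he; simp at h1; omega
        have hw : (if seats.isEmpty then (0:Int) else ((seats.headD []).length : Int))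
            = (((PySem.List.pyGet? seats 0).getD []).length : Int) := by
          rw [width_eq seats hne]; simp [List.isEmpty_iff, hne]
        have h2 : ¬ (0 ≤ col - 1 ∧ col - 1 < (((PySem.List.pyGet? seats 0).getD []).length : Int)) := by
          intro hc
          exact hg ⟨h1.1, h1.2, hc.1, by rw [hw]; exact hc.2⟩
        rw [if_neg h2]
        simp [OUT_OF_BOUNDS, FLOOR]
      · rw [if_neg h1]
        simp [OUT_OF_BOUNDS, FLOOR]

-- ===== VERDICT (by name: the statement is the Claim_ definition above) =====
theorem down_left_spec : Claim_equal_down_left := by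
  intro seats row col _ hp
  unfold Spec_down_left down_left_alt
  exact main_eq seats ((seats.length : Int) - row).toNat row col hp le_rfl
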